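-- pv_equiv track=rewrite | github.com/sam-caldwell/crsce | tools/b64a_sweep.py | rltp_cost
-- ===== SOURCE A (Python) =====
-- def graduated_crc_bits(length, max_tier_width):
--     """Return CRC width for a line of given length under graduated scheme."""
--     if length <= 8: return 8
--     if length <= 16: return 16
--     if length <= 32: return 32
--     if length <= 64: return min(64, max_tier_width)
--     if length <= 128: return min(128, max_tier_width)
--     return min(256, max_tier_width)
--
-- def rltp_cost(n_tables, max_line, max_tier_width):
--     """Cost in bits for rLTP sub-tables."""
--     cost_per = 0
--     eqs_per = 0
--     for l in range(1, max_line + 1):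
--         w = graduated_crc_bits(l, max_tier_width)
--         cost_per += w
--         eqs_per += w
--     return n_tables * cost_per, n_tables * eqs_per
-- ===== SOURCE B (Python) =====
-- def rltp_cost(n_tables, max_line, max_tier_width):
--     """Cost in bits for rLTP sub-tables (closed form over the fixed CRC tiers)."""
--     def cnt(lo, hi):
--         return max(0, min(max_line, hi) - lo + 1)
--     s = (8 * cnt(1, 8)
--          + 16 * cnt(9, 16)
--          + 32 * cnt(17, 32)
--          + min(64, max_tier_width) * cnt(33, 64)
--          + min(128, max_tier_width) * cnt(65, 128)
--          + min(256, max_tier_width) * max(0, max_line - 128))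
--     total = n_tables * s
--     return total, total
-- ===== Notes on version B (the rewrite author's own statement) =====
-- stated objective: faster
-- what changed: Replaced the per-line loop summing graduated CRC widths with a closed-form sum: count how many lengths fall in each fixed tier and multiply by that tier's width.
import Mathlib
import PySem

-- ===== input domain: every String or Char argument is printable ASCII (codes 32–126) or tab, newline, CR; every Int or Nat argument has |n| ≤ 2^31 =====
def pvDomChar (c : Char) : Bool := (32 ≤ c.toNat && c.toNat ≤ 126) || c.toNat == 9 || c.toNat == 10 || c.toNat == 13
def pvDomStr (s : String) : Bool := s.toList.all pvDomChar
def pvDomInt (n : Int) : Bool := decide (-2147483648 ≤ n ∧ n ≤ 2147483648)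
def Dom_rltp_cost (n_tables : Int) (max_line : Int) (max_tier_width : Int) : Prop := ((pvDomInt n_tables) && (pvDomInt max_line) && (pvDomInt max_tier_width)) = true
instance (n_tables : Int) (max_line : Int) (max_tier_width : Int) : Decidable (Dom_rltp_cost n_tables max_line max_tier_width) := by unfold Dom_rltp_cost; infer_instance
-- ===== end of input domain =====

-- B replaces A's per-line loop by a closed-form tier-count sum (O(1) vs O(max_line)); return values are identical.

-- ===== PORT A =====
def graduated_crc_bits (length : Int) (max_tier_width : Int) : Int :=
  if length ≤ 8 then 8
  else if length ≤ 16 then 16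
  else if length ≤ 32 then 32
  else if length ≤ 64 then min 64 max_tier_width
  else if length ≤ 128 then min 128 max_tier_width
  else min 256 max_tier_width

def rltp_cost (n_tables : Int) (max_line : Int) (max_tier_width : Int) : Int × Int :=
  let st := (PySem.List.pyRange 1 (max_line + 1) 1).foldl
              (fun (p : Int × Int) l =>
                let w := graduated_crc_bits l max_tier_width
                (p.1 + w, p.2 + w)) (0, 0)
  (n_tables * st.1, n_tables * st.2)

-- ===== PORT B =====
def rltpCnt (max_line lo hi : Int) : Int := max 0 (min max_line hi - lo + 1)

def rltp_cost_alt (n_tables : Int) (max_line : Int) (max_tier_width : Int) : Int × Int :=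
  let s := 8 * rltpCnt max_line 1 8
         + 16 * rltpCnt max_line 9 16
         + 32 * rltpCnt max_line 17 32
         + min 64 max_tier_width * rltpCnt max_line 33 64
         + min 128 max_tier_width * rltpCnt max_line 65 128
         + min 256 max_tier_width * max 0 (max_line - 128)
  let total := n_tables * s
  (total, total)

-- ===== PRECONDITION & SPEC =====
def Spec_rltp_cost (n_tables : Int) (max_line : Int) (max_tier_width : Int) (out : Int × Int) : Prop := out = rltp_cost_alt n_tables max_line max_tier_width
instance (n_tables : Int) (max_line : Int) (max_tier_width : Int) (out : Int × Int) : Decidable (Spec_rltp_cost n_tables max_line max_tier_width out) := by unfold Spec_rltp_cost; infer_instance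

-- ===== CLAIM (what is proved, stated in full; the proofs are below) =====
def Claim_equal_rltp_cost : Prop := ∀ (n_tables : Int) (max_line : Int) (max_tier_width : Int), Dom_rltp_cost n_tables max_line max_tier_width → Spec_rltp_cost n_tables max_line max_tier_width (rltp_cost n_tables max_line max_tier_width)

-- ===== LEMMAS AND PROOFS =====

-- B's closed-form sum as a function of max_line
def rltpS (m w : Int) : Int :=
  8 * rltpCnt m 1 8 + 16 * rltpCnt m 9 16 + 32 * rltpCnt m 17 32
  + min 64 w * rltpCnt m 33 64 + min 128 w * rltpCnt m 65 128
  + min 256 w * max 0 (m - 128)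

lemma rltpS_nonpos (m w : Int) (h : m ≤ 0) : rltpS m w = 0 := by
  unfold rltpS rltpCnt
  have e1 : max 0 (min m 8 - 1 + 1) = 0 := by omega
  have e2 : max 0 (min m 16 - 9 + 1) = 0 := by omega
  have e3 : max 0 (min m 32 - 17 + 1) = 0 := by omega
  have e4 : max 0 (min m 64 - 33 + 1) = 0 := by omega
  have e5 : max 0 (min m 128 - 65 + 1) = 0 := by omega
  have e6 : max 0 (m - 128) = 0 := by omega
  rw [e1, e2, e3, e4, e5, e6]; ring

lemma rltpS_step (m w : Int) (h : 0 ≤ m) :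
    rltpS (m + 1) w = rltpS m w + graduated_crc_bits (m + 1) w := by
  unfold rltpS rltpCnt graduated_crc_bits
  split_ifs with h1 h2 h3 h4 h5
  · have e1 : max 0 (min (m+1) 8 - 1 + 1) = max 0 (min m 8 - 1 + 1) + 1 := by omega
    have e2 : max 0 (min (m+1) 16 - 9 + 1) = max 0 (min m 16 - 9 + 1) := by omega
    have e3 : max 0 (min (m+1) 32 - 17 + 1) = max 0 (min m 32 - 17 + 1) := by omega
    have e4 : max 0 (min (m+1) 64 - 33 + 1) = max 0 (min m 64 - 33 + 1) := by omega
    have e5 : max 0 (min (m+1) 128 - 65 + 1) = max 0 (min m 128 - 65 + 1) := by omega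
    have e6 : max 0 (m + 1 - 128) = max 0 (m - 128) := by omega
    rw [e1, e2, e3, e4, e5, e6]; ring
  · have e1 : max 0 (min (m+1) 8 - 1 + 1) = max 0 (min m 8 - 1 + 1) := by omega
    have e2 : max 0 (min (m+1) 16 - 9 + 1) = max 0 (min m 16 - 9 + 1) + 1 := by omega
    have e3 : max 0 (min (m+1) 32 - 17 + 1) = max 0 (min m 32 - 17 + 1) := by omega
    have e4 : max 0 (min (m+1) 64 - 33 + 1) = max 0 (min m 64 - 33 + 1) := by omega
    have e5 : max 0 (min (m+1) 128 - 65 + 1) = max 0 (min m 128 - 65 + 1) := by omega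
    have e6 : max 0 (m + 1 - 128) = max 0 (m - 128) := by omega
    rw [e1, e2, e3, e4, e5, e6]; ring
  · have e1 : max 0 (min (m+1) 8 - 1 + 1) = max 0 (min m 8 - 1 + 1) := by omega
    have e2 : max 0 (min (m+1) 16 - 9 + 1) = max 0 (min m 16 - 9 + 1) := by omega
    have e3 : max 0 (min (m+1) 32 - 17 + 1) = max 0 (min m 32 - 17 + 1) + 1 := by omega
    have e4 : max 0 (min (m+1) 64 - 33 + 1) = max 0 (min m 64 - 33 + 1) := by omega
    have e5 : max 0 (min (m+1) 128 - 65 + 1) = max 0 (min m 128 - 65 + 1) := by omega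
    have e6 : max 0 (m + 1 - 128) = max 0 (m - 128) := by omega
    rw [e1, e2, e3, e4, e5, e6]; ring
  · have e1 : max 0 (min (m+1) 8 - 1 + 1) = max 0 (min m 8 - 1 + 1) := by omega
    have e2 : max 0 (min (m+1) 16 - 9 + 1) = max 0 (min m 16 - 9 + 1) := by omega
    have e3 : max 0 (min (m+1) 32 - 17 + 1) = max 0 (min m 32 - 17 + 1) := by omega
    have e4 : max 0 (min (m+1) 64 - 33 + 1) = max 0 (min m 64 - 33 + 1) + 1 := by omega
    have e5 : max 0 (min (m+1) 128 - 65 + 1) = max 0 (min m 128 - 65 + 1) := by omega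
    have e6 : max 0 (m + 1 - 128) = max 0 (m - 128) := by omega
    rw [e1, e2, e3, e4, e5, e6]; ring
  · have e1 : max 0 (min (m+1) 8 - 1 + 1) = max 0 (min m 8 - 1 + 1) := by omega
    have e2 : max 0 (min (m+1) 16 - 9 + 1) = max 0 (min m 16 - 9 + 1) := by omega
    have e3 : max 0 (min (m+1) 32 - 17 + 1) = max 0 (min m 32 - 17 + 1) := by omega
    have e4 : max 0 (min (m+1) 64 - 33 + 1) = max 0 (min m 64 - 33 + 1) := by omega
    have e5 : max 0 (min (m+1) 128 - 65 + 1) = max 0 (min m 128 - 65 + 1) + 1 := by omega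
    have e6 : max 0 (m + 1 - 128) = max 0 (m - 128) := by omega
    rw [e1, e2, e3, e4, e5, e6]; ring
  · have e1 : max 0 (min (m+1) 8 - 1 + 1) = max 0 (min m 8 - 1 + 1) := by omega
    have e2 : max 0 (min (m+1) 16 - 9 + 1) = max 0 (min m 16 - 9 + 1) := by omega
    have e3 : max 0 (min (m+1) 32 - 17 + 1) = max 0 (min m 32 - 17 + 1) := by omega
    have e4 : max 0 (min (m+1) 64 - 33 + 1) = max 0 (min m 64 - 33 + 1) := by omega
    have e5 : max 0 (min (m+1) 128 - 65 + 1) = max 0 (min m 128 - 65 + 1) := by omega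
    have e6 : max 0 (m + 1 - 128) = max 0 (m - 128) + 1 := by omega
    rw [e1, e2, e3, e4, e5, e6]; ring

-- A's pair-state fold splits into two identical scalar folds
lemma rltp_fold_pair (w : Int) (xs : List Int) (a b : Int) :
    xs.foldl (fun (p : Int × Int) l =>
        let v := graduated_crc_bits l w
        (p.1 + v, p.2 + v)) (a, b)
      = (xs.foldl (fun acc l => acc + graduated_crc_bits l w) a,
         xs.foldl (fun acc l => acc + graduated_crc_bits l w) b) := by
  induction xs generalizing a b with
  | nil => rfl
  | cons x t ih => simp [List.foldl, ih]

-- the scalar loop over range(1, k+1) equals the closed form at k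
lemma rltp_loop (w : Int) (k : Nat) :
    (PySem.List.pyRange 1 ((k : Int) + 1) 1).foldl
        (fun acc l => acc + graduated_crc_bits l w) 0 = rltpS (k : Int) w := by
  induction k with
  | zero =>
    push_cast
    rw [PySem.List.pyRange_one_eq_nil (a := 1) (b := (1 : Int)) (by norm_num)]
    rw [rltpS_nonpos 0 w le_rfl]
    rfl
  | succ n ih =>
    have h : PySem.List.pyRange 1 ((↑(n + 1) : Int) + 1) 1
        = PySem.List.pyRange 1 ((n : Int) + 1) 1 ++ [(n : Int) + 1] := by
      have := PySem.List.pyRange_one_succ_right (a := 1) (b := (n : Int) + 1)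
        (by omega)
      push_cast
      push_cast at this
      exact this
    rw [h, List.foldl_append, ih]
    simp only [List.foldl]
    rw [← rltpS_step (n : Int) w (by omega)]
    push_cast
    ring_nf

-- ===== VERDICT (by name: the statement is the Claim_ definition above) =====
theorem rltp_cost_spec : Claim_equal_rltp_cost := by
  intro n m w _
  unfold Spec_rltp_cost rltp_cost rltp_cost_alt
  have hS : (PySem.List.pyRange 1 (m + 1) 1).foldl
      (fun acc l => acc + graduated_crc_bits l w) 0 = rltpS m w := by
    by_cases h : m ≤ 0
    · rw [PySem.List.pyRange_one_eq_nil (a := 1) (b := m + 1) (by omega), rltpS_nonpos m w h]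
      rfl
    · have hm : m = ((m.toNat : Int)) := (Int.toNat_of_nonneg (by omega)).symm
      rw [hm]; exact rltp_loop w m.toNat
  simp only [rltp_fold_pair, hS]
  unfold rltpS rltpCnt
  ring_nf
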